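-- pv_equiv track=rewrite | github.com/dilkas/kr23-db | solutions.py | crane_one_dimensional_surjections
-- ===== SOURCE A (Python) =====
-- import math
--
-- def crane_one_dimensional_surjections(n):
--     return sum(
--         math.comb(n, m)
--         * (-1) ** (n - m)
--         * sum(
--             math.comb(n, l) * (-1) ** (n - l) * crane_one_dimensional_surjections2(l, m)
--             for l in range(n + 1)
--         )
--         for m in range(n + 1)
--     )
--
-- def crane_one_dimensional_surjections2(l, m):
--     if m == 0:
--         return 1
--     return (l + 1) * crane_one_dimensional_surjections2(l, m - 1)
-- ===== SOURCE B (Python) =====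
-- import math
--
-- def crane_one_dimensional_surjections(n):
--     # Swapped loop order: for each l, accumulate powers of (l+1) incrementally
--     # instead of recomputing them via linear recursion (O(n^2) mults vs O(n^3)).
--     total = 0
--     for l in range(n + 1):
--         s = 0
--         p = 1
--         for m in range(n + 1):
--             s += math.comb(n, m) * (-1) ** (n - m) * p
--             p *= l + 1
--         total += math.comb(n, l) * (-1) ** (n - l) * s
--     return total
-- ===== Notes on version B (the rewrite author's own statement) =====
-- stated objective: faster
-- what changed: Swapped the loop order (l outer, m inner) and replaced the linear recursion computing (l+1)^m with an incrementally maintained power accumulator, cutting the multiplication count from O(n^3) to O(n^2).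
import Mathlib
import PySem

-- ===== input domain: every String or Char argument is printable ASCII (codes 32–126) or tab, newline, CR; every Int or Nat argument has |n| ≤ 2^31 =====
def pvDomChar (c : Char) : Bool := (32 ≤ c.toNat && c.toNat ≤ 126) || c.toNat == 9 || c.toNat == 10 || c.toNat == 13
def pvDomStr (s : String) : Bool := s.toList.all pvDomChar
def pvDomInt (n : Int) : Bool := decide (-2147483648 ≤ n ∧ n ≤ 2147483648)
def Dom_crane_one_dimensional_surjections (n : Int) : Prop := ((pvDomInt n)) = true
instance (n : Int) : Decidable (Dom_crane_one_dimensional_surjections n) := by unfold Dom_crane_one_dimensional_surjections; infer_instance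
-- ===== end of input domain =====

-- B swaps the loop order and maintains (l+1)^m incrementally instead of A's
-- per-term linear recursion: O(n^2) multiplications instead of O(n^3).


-- ===== PORT A =====
-- math.comb(n, k); inside both programs it is only reached with 0 ≤ k and 0 ≤ n
-- (the ranges are empty for n < 0), where Nat.choose is exact (0 when k > n, as in Python).
def pyComb (n k : Int) : Int := (n.toNat.choose k.toNat : Int)

-- crane_one_dimensional_surjections2: the recursion on m, run on m.toNat
-- (every call site has 0 ≤ m, m is the loop variable of range(n+1)).
def c2go (l : Int) : Nat → Int
  | 0 => 1
  | k + 1 => (l + 1) * c2go l k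

def crane_one_dimensional_surjections2 (l m : Int) : Int := c2go l m.toNat

def crane_one_dimensional_surjections (n : Int) : Int :=
  ((PySem.List.pyRange 0 (n + 1) 1).map (fun m =>
    pyComb n m * (-1) ^ (n - m).toNat *
      ((PySem.List.pyRange 0 (n + 1) 1).map (fun l =>
        pyComb n l * (-1) ^ (n - l).toNat * crane_one_dimensional_surjections2 l m)).sum)).sum

-- ===== PORT B =====
def crane_one_dimensional_surjections_alt (n : Int) : Int :=
  (PySem.List.pyRange 0 (n + 1) 1).foldl (fun total l =>
    let sp : Int × Int := (PySem.List.pyRange 0 (n + 1) 1).foldl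
      (fun (sp : Int × Int) m => (sp.1 + pyComb n m * (-1) ^ (n - m).toNat * sp.2, sp.2 * (l + 1)))
      (0, 1)
    total + pyComb n l * (-1) ^ (n - l).toNat * sp.1) 0

-- ===== PRECONDITION & SPEC =====
def Spec_crane_one_dimensional_surjections (n : Int) (out : Int) : Prop := out = crane_one_dimensional_surjections_alt n
instance (n : Int) (out : Int) : Decidable (Spec_crane_one_dimensional_surjections n out) := by unfold Spec_crane_one_dimensional_surjections; infer_instance

-- ===== CLAIM (what is proved, stated in full; the proofs are below) =====
def Claim_equal_crane_one_dimensional_surjections : Prop := ∀ (n : Int), Dom_crane_one_dimensional_surjections n → Spec_crane_one_dimensional_surjections n (crane_one_dimensional_surjections n)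

-- ===== LEMMAS AND PROOFS =====

-- the recursion computes a power
theorem c2go_eq_pow (l : Int) (k : Nat) : c2go l k = (l + 1) ^ k := by
  induction k with
  | zero => simp [c2go]
  | succ k ih => simp [c2go, ih, pow_succ]; ring

-- B's inner loop over range N: the pair state is (partial sum, (l+1)^count)
theorem inner_loop (n l : Int) (N : Nat) :
    (List.range N).foldl
      (fun (sp : Int × Int) (k : Nat) =>
        (sp.1 + pyComb n k * (-1) ^ (n - k).toNat * sp.2, sp.2 * (l + 1)))
      (0, 1)
    = (∑ m ∈ Finset.range N, pyComb n m * (-1) ^ (n - m).toNat * (l + 1) ^ m,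
       (l + 1) ^ N) := by
  induction N with
  | zero => simp
  | succ N ih =>
      rw [List.range_succ, List.foldl_append, ih]
      simp [Finset.sum_range_succ, pow_succ]

-- B's outer loop is a sum
theorem outer_loop (N : Nat) (g : Nat → Int) (init : Int) :
    (List.range N).foldl (fun total k => total + g k) init
      = init + ∑ l ∈ Finset.range N, g l := by
  induction N generalizing init with
  | zero => simp
  | succ N ih => rw [List.range_succ, List.foldl_append, ih]; simp [Finset.sum_range_succ]; ring

-- list-map sum over range is a Finset sum (definitional)
theorem sum_map_range (N : Nat) (f : Nat → Int) :
    ((List.range N).map f).sum = ∑ k ∈ Finset.range N, f k := rfl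

-- ===== VERDICT (by name: the statement is the Claim_ definition above) =====
theorem crane_one_dimensional_surjections_spec : Claim_equal_crane_one_dimensional_surjections := by
  intro n _
  unfold Spec_crane_one_dimensional_surjections
  unfold crane_one_dimensional_surjections crane_one_dimensional_surjections_alt
  rw [PySem.List.pyRange_one]
  simp only [List.map_map, List.foldl_map, Function.comp_def, zero_add,
    crane_one_dimensional_surjections2, Int.toNat_natCast]
  simp only [sum_map_range, inner_loop, c2go_eq_pow]
  simp_rw [Finset.mul_sum]
  rw [Finset.sum_comm, outer_loop, zero_add]
  apply Finset.sum_congr rfl; intro l _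
  apply Finset.sum_congr rfl; intro m _
  ring
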